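-- pv_equiv track=rewrite | github.com/ravireddy07/Expert_HelloExperts | BankersAlgorithm/BankersAlgorithmPython.py | get_total_allocation
-- ===== SOURCE A (Python) =====
-- def get_total_allocation(process=[], size=0, number_of_resources=0):
-- 	summation = 0
-- 	total_allocation = []
-- 	for resource_number in range(0, number_of_resources):
-- 		for index in range(0, size):
-- 			summation += process[index][1][resource_number]
-- 		total_allocation.append(summation)
-- 		summation = 0
-- 	return total_allocation
-- ===== SOURCE B (Python) =====
-- def get_total_allocation(process=[], size=0, number_of_resources=0):
-- 	if number_of_resources <= 0:
-- 		return []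
-- 	def col_sums(lo, hi):
-- 		if hi - lo <= 0:
-- 			return [0] * number_of_resources
-- 		if hi - lo == 1:
-- 			return [process[lo][1][r] for r in range(number_of_resources)]
-- 		mid = (lo + hi) // 2
-- 		return [x + y for x, y in zip(col_sums(lo, mid), col_sums(mid, hi))]
-- 	return col_sums(0, size)
-- ===== Notes on version B (the rewrite author's own statement) =====
-- stated objective: alternative
-- what changed: B computes the column-sum vector by divide-and-conquer: it recursively splits the row interval in half, computes each half's column sums, and merges them with element-wise vector addition, replacing A's nested resource-major loops with scalar accumulation.
import Mathlib
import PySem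

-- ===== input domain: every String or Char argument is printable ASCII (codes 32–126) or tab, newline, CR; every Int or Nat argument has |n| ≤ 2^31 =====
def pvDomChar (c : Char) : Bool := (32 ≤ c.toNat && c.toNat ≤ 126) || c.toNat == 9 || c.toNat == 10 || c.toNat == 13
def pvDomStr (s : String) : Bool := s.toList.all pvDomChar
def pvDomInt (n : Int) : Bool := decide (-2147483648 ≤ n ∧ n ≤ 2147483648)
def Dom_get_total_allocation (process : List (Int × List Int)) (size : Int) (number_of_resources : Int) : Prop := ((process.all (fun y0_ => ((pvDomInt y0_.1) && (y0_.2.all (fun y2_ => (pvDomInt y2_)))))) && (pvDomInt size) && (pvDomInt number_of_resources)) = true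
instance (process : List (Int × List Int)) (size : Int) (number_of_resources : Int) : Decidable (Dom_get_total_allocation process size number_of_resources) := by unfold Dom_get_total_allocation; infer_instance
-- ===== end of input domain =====

-- B replaces A's nested resource-major scalar loops by divide-and-conquer on the row
-- interval, merging the halves' column-sum vectors element-wise (alternative, same cost).

-- ===== PORT A =====
def get_total_allocation (process : List (Int × List Int)) (size : Int) (number_of_resources : Int) : List Int :=
  ((PySem.List.pyRange 0 number_of_resources 1).foldl
    (fun (st : Int × List Int) resource_number =>
      let summation := (PySem.List.pyRange 0 size 1).foldl
        (fun s index =>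
          s + PySem.List.pyGetD (PySem.List.pyGetD process index (0, [])).2 resource_number 0)
        st.1
      (0, st.2 ++ [summation]))
    (0, [])).2

-- ===== PORT B =====
-- termination of the recursive helper: the midpoint splits the interval strictly
theorem pv_mid_bounds (lo hi : Int) (h2 : ¬ hi - lo ≤ 0) (h1 : ¬ hi - lo = 1) :
    lo + 1 ≤ PySem.Int.floordiv (lo + hi) 2 ∧ PySem.Int.floordiv (lo + hi) 2 < hi := by
  constructor
  · rw [PySem.Int.le_floordiv_iff_mul_le (by norm_num : (0:Int) < 2)]; omega
  · rw [PySem.Int.floordiv_lt_iff_lt_mul (by norm_num : (0:Int) < 2)]; omega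

def pvColSums (process : List (Int × List Int)) (number_of_resources : Int) (lo hi : Int) : List Int :=
  if h0 : hi - lo ≤ 0 then
    List.replicate number_of_resources.toNat 0
  else if h1 : hi - lo = 1 then
    (PySem.List.pyRange 0 number_of_resources 1).map
      (fun r => PySem.List.pyGetD (PySem.List.pyGetD process lo (0, [])).2 r 0)
  else
    List.zipWith (fun x y => x + y)
      (pvColSums process number_of_resources lo (PySem.Int.floordiv (lo + hi) 2))
      (pvColSums process number_of_resources (PySem.Int.floordiv (lo + hi) 2) hi)
termination_by (hi - lo).toNat
decreasing_by
  · have := pv_mid_bounds lo hi h0 h1; omega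
  · have := pv_mid_bounds lo hi h0 h1; omega

def get_total_allocation_alt (process : List (Int × List Int)) (size : Int) (number_of_resources : Int) : List Int :=
  if number_of_resources ≤ 0 then []
  else pvColSums process number_of_resources 0 size

-- ===== PRECONDITION & SPEC =====
-- Pre_ excludes exactly the inputs on which Python A raises IndexError: positive
-- number_of_resources together with a positive size exceeding the process list or
-- reaching a row whose allocation vector is shorter than number_of_resources.
def Pre_get_total_allocation (process : List (Int × List Int)) (size : Int) (number_of_resources : Int) : Prop :=
  number_of_resources ≤ 0 ∨ size ≤ 0 ∨
    (size ≤ (process.length : Int) ∧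
      ∀ p ∈ process.take size.toNat, number_of_resources ≤ (p.2.length : Int))
instance (process : List (Int × List Int)) (size : Int) (number_of_resources : Int) : Decidable (Pre_get_total_allocation process size number_of_resources) := by unfold Pre_get_total_allocation; infer_instance
def pvWitness_get_total_allocation : (List (Int × List Int)) × Int × Int := ([(1, [2, 3]), (4, [5, 6])], 2, 2)

def Spec_get_total_allocation (process : List (Int × List Int)) (size : Int) (number_of_resources : Int) (out : List Int) : Prop := out = get_total_allocation_alt process size number_of_resources
instance (process : List (Int × List Int)) (size : Int) (number_of_resources : Int) (out : List Int) : Decidable (Spec_get_total_allocation process size number_of_resources out) := by unfold Spec_get_total_allocation; infer_instance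

-- ===== CLAIM (what is proved, stated in full; the proofs are below) =====
def Claim_equal_get_total_allocation : Prop := ∀ (process : List (Int × List Int)) (size : Int) (number_of_resources : Int), Dom_get_total_allocation process size number_of_resources → Pre_get_total_allocation process size number_of_resources → Spec_get_total_allocation process size number_of_resources (get_total_allocation process size number_of_resources)

-- ===== LEMMAS AND PROOFS =====

-- A's loop with its append-and-reset state produces the map of per-column results.
theorem pv_reset_foldl (g : Int → Int → Int) (l : List Int) : ∀ acc : List Int,
    (l.foldl (fun (st : Int × List Int) r => (0, st.2 ++ [g st.1 r])) (0, acc)).2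
      = acc ++ l.map (g 0) := by
  induction l with
  | nil => intro acc; simp
  | cons a t ih => intro acc; simpa using ih (acc ++ [g 0 a])

theorem pv_A_eq_map (process : List (Int × List Int)) (size number_of_resources : Int) :
    get_total_allocation process size number_of_resources
      = (PySem.List.pyRange 0 number_of_resources 1).map
          (fun r => ((PySem.List.pyRange 0 size 1).map
            (fun i => PySem.List.pyGetD (PySem.List.pyGetD process i (0, [])).2 r 0)).sum) := by
  unfold get_total_allocation
  refine Eq.trans (pv_reset_foldl
      (fun s r => (PySem.List.pyRange 0 size 1).foldl
        (fun a i => a + PySem.List.pyGetD (PySem.List.pyGetD process i (0, [])).2 r 0) s)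
      (PySem.List.pyRange 0 number_of_resources 1) []) ?_
  simp only [List.nil_append]
  refine List.map_congr_left fun r _ => ?_
  rw [PySem.List.foldl_add]
  simp

-- element-wise addition of two maps over the same list is a map of the pointwise sum
theorem pv_zipWith_map (f g : Int → Int) (l : List Int) :
    List.zipWith (fun x y => x + y) (l.map f) (l.map g) = l.map (fun r => f r + g r) := by
  induction l with
  | nil => simp
  | cons a t ih => simp [ih]

-- B's recursion computes, for every column, the sum over the row interval [lo, hi).
theorem pv_colSums_eq (process : List (Int × List Int)) (number_of_resources : Int) :
    ∀ lo hi : Int, pvColSums process number_of_resources lo hi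
      = (PySem.List.pyRange 0 number_of_resources 1).map
          (fun r => ((PySem.List.pyRange lo hi 1).map
            (fun i => PySem.List.pyGetD (PySem.List.pyGetD process i (0, [])).2 r 0)).sum) := by
  intro lo hi
  induction lo, hi using pvColSums.induct with
  | case1 lo hi h0 =>
    rw [pvColSums, dif_pos h0, PySem.List.pyRange_one_eq_nil (by omega)]
    apply List.ext_getElem (by simp)
    intro j h1 h2
    simp
  | case2 lo hi h0 h1 =>
    rw [pvColSums, dif_neg h0, dif_pos h1,
        show hi = lo + 1 by omega, PySem.List.pyRange_one_singleton]
    simp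
  | case3 lo hi h0 h1 ih1 ih2 =>
    rw [pvColSums, dif_neg h0, dif_neg h1, ih1, ih2, pv_zipWith_map]
    refine List.map_congr_left fun r _ => ?_
    have hb := pv_mid_bounds lo hi h0 h1
    rw [PySem.List.pyRange_one_append lo (PySem.Int.floordiv (lo + hi) 2) hi
        (by omega) (by omega)]
    simp

-- ===== VERDICT (by name: the statement is the Claim_ definition above) =====
theorem get_total_allocation_spec : Claim_equal_get_total_allocation := by
  intro process size number_of_resources _ _
  unfold Spec_get_total_allocation get_total_allocation_alt
  by_cases h : number_of_resources ≤ 0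
  · rw [if_pos h, pv_A_eq_map, PySem.List.pyRange_one_eq_nil (a := 0) (b := number_of_resources) h]
    simp
  · rw [if_neg h, pv_A_eq_map, pv_colSums_eq]
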